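-- pv_equiv track=rewrite | github.com/Vpolgolosa/Python_Console_Chess | Chess/wincondition.py | checkknwc
-- ===== SOURCE A (Python) =====
-- def checkknwc(deck, fi, fj, face):
--     oenemfig = [["41"], ["42"]]
--     check = 0
--     si = [fi + 2, fi - 2, fi, fi]
--     sj = [fj, fj, fj + 2, fj - 2]
--     mi = [0, 0, 1, 1]
--     mj = [1, 1, 0, 0]
--     step = 0
--     while step < 4:
--         i = si[step]
--         j = sj[step]
--         if 8 > i + mi[step] > -1 and 8 > j + mj[step] > -1:
--             if deck[i + mi[step]][j + mj[step]] != "0":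
--                 if deck[i + mi[step]][j + mj[step]] in oenemfig[face]:
--                     check = 1
--                     break
--         if 8 > i - mi[step] > -1 and 8 > j - mj[step] > -1:
--             if deck[i - mi[step]][j - mj[step]] != "0":
--                 if deck[i - mi[step]][j - mj[step]] in oenemfig[face]:
--                     check = 1
--                     break
--         if check == 0:
--             step += 1
--         else:
--             break
--     return check
-- ===== SOURCE B (Python) =====
-- def checkknwc(deck, fi, fj, face):
--     oenemfig = [["41"], ["42"]]
--     for i, row in enumerate(deck[:8]):
--         for j, p in enumerate(row[:8]):
--             if (abs(i - fi), abs(j - fj)) in ((1, 2), (2, 1)) and p != "0" and p in oenemfig[face]: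
--                 return 1
--     return 0
-- ===== Notes on version B (the rewrite author's own statement) =====
-- stated objective: idiomatic
-- what changed: B enumerates the actual board cells (rows and cells capped at 8) and tests each for knight distance from the king, instead of A's while loop probing 8 precomputed target squares through parallel si/sj/mi/mj offset lists.
import Mathlib
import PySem

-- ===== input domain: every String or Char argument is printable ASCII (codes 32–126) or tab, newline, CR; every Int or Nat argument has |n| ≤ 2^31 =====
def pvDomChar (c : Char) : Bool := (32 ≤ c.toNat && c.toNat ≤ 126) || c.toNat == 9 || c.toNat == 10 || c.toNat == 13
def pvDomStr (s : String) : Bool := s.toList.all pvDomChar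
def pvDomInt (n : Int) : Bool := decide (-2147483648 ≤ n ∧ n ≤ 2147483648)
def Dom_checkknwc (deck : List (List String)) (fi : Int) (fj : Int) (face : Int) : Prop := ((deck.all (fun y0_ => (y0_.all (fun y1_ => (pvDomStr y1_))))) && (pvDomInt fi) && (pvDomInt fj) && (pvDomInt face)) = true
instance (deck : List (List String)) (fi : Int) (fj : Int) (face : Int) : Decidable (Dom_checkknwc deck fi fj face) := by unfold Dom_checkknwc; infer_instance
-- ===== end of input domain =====

-- B enumerates the actual board cells (rows/cells capped at 8) and tests each for knight
-- distance from the king, instead of A's while loop probing 8 precomputed target squares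
-- through parallel si/sj/mi/mj offset lists; no speed claim.

-- ===== PORT A =====
-- deck[x][y]; inside Pre_ every access A performs is in bounds, the defaults are never read
def pvCellA (deck : List (List String)) (x y : Int) : String :=
  (PySem.List.pyGet? ((PySem.List.pyGet? deck x).getD []) y).getD ""

-- oenemfig[face]; inside Pre_ the default is never read
def pvEnemA (face : Int) : List String :=
  (PySem.List.pyGet? [["41"], ["42"]] face).getD []

-- the three nested ifs of A's probe of one square (bounds, != "0", membership)
def pvHitA (deck : List (List String)) (face x y : Int) : Bool :=
  decide (8 > x ∧ x > -1 ∧ 8 > y ∧ y > -1) &&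
    (pvCellA deck x y != "0") && ((pvEnemA face).contains (pvCellA deck x y))

-- A's while loop over step = 0..3; break → return 1
def checkknwcLoop (deck : List (List String)) (face : Int)
    (si sj mi mj : List Int) : List Int → Int
  | [] => 0
  | step :: rest =>
    let i := (PySem.List.pyGet? si step).getD 0
    let j := (PySem.List.pyGet? sj step).getD 0
    let a := (PySem.List.pyGet? mi step).getD 0
    let b := (PySem.List.pyGet? mj step).getD 0
    if pvHitA deck face (i + a) (j + b) then 1
    else if pvHitA deck face (i - a) (j - b) then 1
    else checkknwcLoop deck face si sj mi mj rest

def checkknwc (deck : List (List String)) (fi : Int) (fj : Int) (face : Int) : Int :=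
  checkknwcLoop deck face [fi + 2, fi - 2, fi, fi] [fj, fj, fj + 2, fj - 2]
    [0, 0, 1, 1] [1, 1, 0, 0] [0, 1, 2, 3]

-- ===== PORT B =====
-- for i, row in enumerate(deck[:8]): for j, p in enumerate(row[:8]): …  return 1 on first
-- knight-distance enemy knight, else 0
def checkknwc_alt (deck : List (List String)) (fi : Int) (fj : Int) (face : Int) : Int :=
  if (PySem.List.enumerate (PySem.List.slice deck none (some 8))).any (fun ir =>
      (PySem.List.enumerate (PySem.List.slice ir.2 none (some 8))).any (fun jp =>
        ([((1 : Nat), (2 : Nat)), (2, 1)].contains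
            ((ir.1 - fi).natAbs, (jp.1 - fj).natAbs)) &&
        (jp.2 != "0") && ((pvEnemA face).contains jp.2)))
  then 1 else 0

-- ===== PRECONDITION & SPEC =====
-- the eight knight offsets, in A's probe order (used only by Pre_)
def pvKoff : List (Int × Int) :=
  [(2, 1), (2, -1), (-2, 1), (-2, -1), (1, 2), (-1, 2), (1, -2), (-1, -2)]

def pvKoffAt (k : Nat) : Int × Int := pvKoff.getD k (0, 0)

def pvInb (fi fj : Int) (d : Int × Int) : Bool :=
  decide (-1 < fi + d.1 ∧ fi + d.1 < 8 ∧ -1 < fj + d.2 ∧ fj + d.2 < 8)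

def pvBacked (deck : List (List String)) (fi fj : Int) (d : Int × Int) : Bool :=
  decide ((fi + d.1).toNat < deck.length ∧
    (fj + d.2).toNat < (deck.getD (fi + d.1).toNat []).length)

def pvCellv (deck : List (List String)) (fi fj : Int) (d : Int × Int) : String :=
  (deck.getD (fi + d.1).toNat []).getD (fj + d.2).toNat ""

def pvEnemPre (face : Int) : List String :=
  if face = 0 ∨ face = -2 then ["41"] else ["42"]

-- Pre_ is exactly the set of inputs on which the Python A returns (no IndexError): with a
-- valid face index every in-board knight square probed before A's first hit must be backed
-- by the deck; with an out-of-range face every in-board knight square must be backed and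
-- empty ("0"), since any occupied one makes A raise on oenemfig[face].
def Pre_checkknwc (deck : List (List String)) (fi : Int) (fj : Int) (face : Int) : Prop :=
  (if -2 ≤ face ∧ face ≤ 1 then
    (List.range 8).all (fun k =>
      !(pvInb fi fj (pvKoffAt k)) ||
      pvBacked deck fi fj (pvKoffAt k) ||
      (List.range k).any (fun m =>
        pvInb fi fj (pvKoffAt m) && pvBacked deck fi fj (pvKoffAt m) &&
        (pvEnemPre face).contains (pvCellv deck fi fj (pvKoffAt m))))
  else
    (List.range 8).all (fun k =>
      !(pvInb fi fj (pvKoffAt k)) ||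
      (pvBacked deck fi fj (pvKoffAt k) &&
        (pvCellv deck fi fj (pvKoffAt k) == "0")))) = true

instance (deck : List (List String)) (fi : Int) (fj : Int) (face : Int) : Decidable (Pre_checkknwc deck fi fj face) := by unfold Pre_checkknwc; infer_instance

def pvWitness_checkknwc : List (List String) × Int × Int × Int :=
  ([["0","0","0","0","0","0","0","0"], ["0","0","0","0","0","0","0","0"],
    ["0","0","0","0","0","0","0","0"], ["0","0","0","0","0","0","0","0"],
    ["0","0","0","0","0","0","0","0"], ["0","0","0","0","0","0","0","0"],
    ["0","0","0","0","0","0","0","0"], ["0","0","0","0","0","0","0","0"]], 4, 4, 0)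

def Spec_checkknwc (deck : List (List String)) (fi : Int) (fj : Int) (face : Int) (out : Int) : Prop := out = checkknwc_alt deck fi fj face
instance (deck : List (List String)) (fi : Int) (fj : Int) (face : Int) (out : Int) : Decidable (Spec_checkknwc deck fi fj face out) := by unfold Spec_checkknwc; infer_instance

-- ===== CLAIM (what is proved, stated in full; the proofs are below) =====
def Claim_equal_checkknwc : Prop := ∀ (deck : List (List String)) (fi : Int) (fj : Int) (face : Int), Dom_checkknwc deck fi fj face → Pre_checkknwc deck fi fj face → Spec_checkknwc deck fi fj face (checkknwc deck fi fj face)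

-- ===== LEMMAS AND PROOFS =====

-- A's eight probes, in order, as one boolean
def pvHits (deck : List (List String)) (fi fj face : Int) : Bool :=
  pvHitA deck face (fi + 2) (fj + 1) || pvHitA deck face (fi + 2) (fj - 1) ||
  pvHitA deck face (fi - 2) (fj + 1) || pvHitA deck face (fi - 2) (fj - 1) ||
  pvHitA deck face (fi + 1) (fj + 2) || pvHitA deck face (fi - 1) (fj + 2) ||
  pvHitA deck face (fi + 1) (fj - 2) || pvHitA deck face (fi - 1) (fj - 2)

-- B's scan as one boolean
def pvScan (deck : List (List String)) (fi fj face : Int) : Bool :=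
  (PySem.List.enumerate (PySem.List.slice deck none (some 8))).any (fun ir =>
      (PySem.List.enumerate (PySem.List.slice ir.2 none (some 8))).any (fun jp =>
        ([((1 : Nat), (2 : Nat)), (2, 1)].contains
            ((ir.1 - fi).natAbs, (jp.1 - fj).natAbs)) &&
        (jp.2 != "0") && ((pvEnemA face).contains jp.2)))

lemma B_char (deck : List (List String)) (fi fj face : Int) :
    checkknwc_alt deck fi fj face = if pvScan deck fi fj face then 1 else 0 := rfl

lemma nest3 (a b c : Bool) :
    (if a then (1 : Int) else if b then 1 else if c then 1 else 0) =
      if (a || b || c) then 1 else 0 := by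
  cases a <;> cases b <;> simp

lemma loop_char (deck : List (List String)) (face : Int) (si sj mi mj : List Int)
    (steps : List Int) :
    checkknwcLoop deck face si sj mi mj steps =
      if steps.any (fun s =>
          pvHitA deck face ((PySem.List.pyGet? si s).getD 0 + (PySem.List.pyGet? mi s).getD 0)
            ((PySem.List.pyGet? sj s).getD 0 + (PySem.List.pyGet? mj s).getD 0) ||
          pvHitA deck face ((PySem.List.pyGet? si s).getD 0 - (PySem.List.pyGet? mi s).getD 0)
            ((PySem.List.pyGet? sj s).getD 0 - (PySem.List.pyGet? mj s).getD 0))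
        then 1 else 0 := by
  induction steps with
  | nil => simp [checkknwcLoop]
  | cons s rest ih =>
    simp only [checkknwcLoop, List.any_cons, ih, nest3, Bool.or_assoc]

lemma A_char (deck : List (List String)) (fi fj face : Int) :
    checkknwc deck fi fj face = if pvHits deck fi fj face then 1 else 0 := by
  rw [checkknwc, loop_char]
  norm_num [pvHits, PySem.List.pyGet?, PySem.List.pyIdx?, Bool.or_assoc,
    (show Int.toNat 2 = 2 from rfl), (show Int.toNat 3 = 3 from rfl),
    List.getElem_cons_succ, List.getElem_cons_zero]

-- membership in B's scan, unfolded to indexed existence over the real deck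
lemma scan_iff (deck : List (List String)) (fi fj face : Int) :
    pvScan deck fi fj face = true ↔
      ∃ i : Nat, ∃ hi : i < deck.length, i < 8 ∧
        ∃ j : Nat, ∃ hj : j < (deck[i]).length, j < 8 ∧
          ((((i : Int) - fi).natAbs, ((j : Int) - fj).natAbs) = (1, 2) ∨
            (((i : Int) - fi).natAbs, ((j : Int) - fj).natAbs) = (2, 1)) ∧
          deck[i][j] ≠ "0" ∧ (pvEnemA face).contains (deck[i][j]) = true := by
  have h8 : (8 : Int) = ((8 : Nat) : Int) := by norm_num
  constructor
  · intro h
    simp only [pvScan, h8, PySem.List.slice_to_natCast, List.any_eq_true,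
      PySem.List.mem_enumerate_iff] at h
    obtain ⟨ir, ⟨i, hi, hir⟩, jp, ⟨j, hj, hjp⟩, hb⟩ := h
    subst hir; subst hjp
    simp only [List.getElem_take] at hj hb ⊢
    have hi' : i < deck.length := by
      have := hi; simp only [List.length_take] at this; omega
    have hi8 : i < 8 := by
      have := hi; simp only [List.length_take] at this; omega
    have hj' : j < (deck[i]).length := by
      have := hj; simp only [List.length_take] at this; omega
    have hj8 : j < 8 := by
      have := hj; simp only [List.length_take] at this; omega
    refine ⟨i, hi', hi8, j, hj', hj8, ?_, ?_, ?_⟩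
    · simp only [Bool.and_eq_true, List.contains_cons, List.contains_nil, Bool.or_false,
        Bool.or_eq_true, beq_iff_eq] at hb
      simpa using hb.1.1
    · simp only [Bool.and_eq_true, bne_iff_ne, ne_eq] at hb
      simpa using hb.1.2
    · simp only [Bool.and_eq_true] at hb
      simpa using hb.2
  · rintro ⟨i, hi, hi8, j, hj, hj8, hgeo, hne, hmem⟩
    simp only [pvScan, h8, PySem.List.slice_to_natCast, List.any_eq_true,
      PySem.List.mem_enumerate_iff]
    have hi' : i < (deck.take 8).length := by simp [List.length_take]; omega
    refine ⟨((i : Int), (deck.take 8)[i]), ⟨i, hi', by simp⟩, ?_⟩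
    have hrow : (deck.take 8)[i] = deck[i] := List.getElem_take
    rw [hrow]
    have hj' : j < ((deck[i]).take 8).length := by simp [List.length_take]; omega
    refine ⟨((j : Int), ((deck[i]).take 8)[j]), ⟨j, hj', by simp⟩, ?_⟩
    have hcell : ((deck[i]).take 8)[j] = deck[i][j] := List.getElem_take
    rw [hcell]
    simp only [Bool.and_eq_true, List.contains_cons, List.contains_nil, Bool.or_false,
      Bool.or_eq_true, beq_iff_eq, bne_iff_ne, ne_eq]
    exact ⟨⟨by simpa using hgeo, by simpa using hne⟩, hmem⟩

-- every string the membership test accepts is "41" or "42"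
lemma enem_val (face : Int) (s : String) (h : (pvEnemA face).contains s = true) :
    s = "41" ∨ s = "42" := by
  unfold pvEnemA at h
  generalize hopt : PySem.List.pyGet? [["41"], ["42"]] face = o at h
  cases o with
  | none => simp at h
  | some l =>
    have hl := PySem.List.mem_of_pyGet?_eq_some _ hopt
    simp only [List.mem_cons, List.not_mem_nil, or_false] at hl
    rcases hl with rfl | rfl <;> simp [List.contains_eq_mem] at h <;> tauto

-- a value accepted by the membership test is a real string, so its pyGet?s were in range
lemma cellA_hit_exists (deck : List (List String)) (face x y : Int)
    (h : (pvEnemA face).contains (pvCellA deck x y) = true) :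
    ∃ row v, PySem.List.pyGet? deck x = some row ∧
      PySem.List.pyGet? row y = some v ∧ pvCellA deck x y = v := by
  have hne : pvCellA deck x y ≠ "" := by
    rcases enem_val face _ h with h1 | h1 <;> simp [h1]
  cases hx : PySem.List.pyGet? deck x with
  | none =>
    exfalso; apply hne
    unfold pvCellA; rw [hx]
    simp only [Option.getD_none]
    cases hy : PySem.List.pyGet? ([] : List String) y with
    | none => rfl
    | some v =>
      have := PySem.List.mem_of_pyGet?_eq_some _ hy
      simp at this
  | some row =>
    cases hy : PySem.List.pyGet? row y with
    | none => exfalso; apply hne; unfold pvCellA; rw [hx]; simp [hy]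
    | some v =>
      refine ⟨row, v, rfl, hy, ?_⟩
      unfold pvCellA
      rw [hx]
      simp [hy]

lemma hit_to_scan (deck : List (List String)) (fi fj face : Int) (x y : Int)
    (hgeo : ((x - fi).natAbs = 1 ∧ (y - fj).natAbs = 2) ∨ ((x - fi).natAbs = 2 ∧ (y - fj).natAbs = 1))
    (h : pvHitA deck face x y = true) : pvScan deck fi fj face = true := by
  simp only [pvHitA, Bool.and_eq_true, decide_eq_true_eq, bne_iff_ne, ne_eq] at h
  obtain ⟨⟨hb, hne⟩, hmem⟩ := h
  obtain ⟨row, v, hrow, hv, hveq⟩ := cellA_hit_exists deck face x y hmem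
  have hx0 : 0 ≤ x := by omega
  have hy0 : 0 ≤ y := by omega
  rw [PySem.List.pyGet?_of_nonneg _ hx0] at hrow
  rw [PySem.List.pyGet?_of_nonneg _ hy0] at hv
  obtain ⟨hxl, hrowe⟩ := List.getElem?_eq_some_iff.mp hrow
  obtain ⟨hyl, hve⟩ := List.getElem?_eq_some_iff.mp hv
  rw [scan_iff]
  refine ⟨x.toNat, hxl, by omega, y.toNat, by rw [hrowe]; exact hyl, by omega, ?_, ?_, ?_⟩
  · have e1 : ((x.toNat : Int)) = x := Int.toNat_of_nonneg hx0
    have e2 : ((y.toNat : Int)) = y := Int.toNat_of_nonneg hy0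
    rw [e1, e2]
    rcases hgeo with ⟨h1, h2⟩ | ⟨h1, h2⟩
    · left; simp [h1, h2]
    · right; simp [h1, h2]
  · simp only [hrowe, hve]; rw [← hveq]; exact hne
  · simp only [hrowe, hve]; rw [← hveq]; exact hmem

theorem ports_agree (deck : List (List String)) (fi fj face : Int) :
    checkknwc deck fi fj face = checkknwc_alt deck fi fj face := by
  rw [A_char, B_char]
  suffices h : pvHits deck fi fj face = pvScan deck fi fj face by rw [h]
  rw [Bool.eq_iff_iff]
  constructor
  · intro h
    simp only [pvHits, Bool.or_eq_true, Bool.or_assoc] at h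
    rcases h with h | h | h | h | h | h | h | h
    · exact hit_to_scan deck fi fj face (fi + 2) (fj + 1) (by omega) h
    · exact hit_to_scan deck fi fj face (fi + 2) (fj - 1) (by omega) h
    · exact hit_to_scan deck fi fj face (fi - 2) (fj + 1) (by omega) h
    · exact hit_to_scan deck fi fj face (fi - 2) (fj - 1) (by omega) h
    · exact hit_to_scan deck fi fj face (fi + 1) (fj + 2) (by omega) h
    · exact hit_to_scan deck fi fj face (fi - 1) (fj + 2) (by omega) h
    · exact hit_to_scan deck fi fj face (fi + 1) (fj - 2) (by omega) h
    · exact hit_to_scan deck fi fj face (fi - 1) (fj - 2) (by omega) h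
  · intro h
    rw [scan_iff] at h
    obtain ⟨i, hi, hi8, j, hj, hj8, hgeo, hne, hmem⟩ := h
    have hA : pvHitA deck face ((i : Int)) ((j : Int)) = true := by
      simp only [pvHitA, pvCellA, Bool.and_eq_true, decide_eq_true_eq]
      have hr : PySem.List.pyGet? deck ((i : Int)) = some (deck[i]) := by
        rw [PySem.List.pyGet?_natCast]; simp [List.getElem?_eq_getElem hi]
      have hc : PySem.List.pyGet? (deck[i]) ((j : Int)) = some (deck[i][j]) := by
        rw [PySem.List.pyGet?_natCast]; simp [List.getElem?_eq_getElem hj]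
      rw [hr]
      simp only [Option.getD_some, hc]
      exact ⟨⟨by omega, by simpa using hne⟩, hmem⟩
    have hd : ((i : Int) - fi = 1 ∨ (i : Int) - fi = -1) ∧ ((j : Int) - fj = 2 ∨ (j : Int) - fj = -2) ∨
              ((i : Int) - fi = 2 ∨ (i : Int) - fi = -2) ∧ ((j : Int) - fj = 1 ∨ (j : Int) - fj = -1) := by
      rcases hgeo with hg | hg <;> (rw [Prod.mk.injEq] at hg; omega)
    simp only [pvHits, Bool.or_eq_true, Bool.or_assoc]
    rcases hd with ⟨hx | hx, hy | hy⟩ | ⟨hx | hx, hy | hy⟩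
    · have e1 : fi + 1 = (i : Int) := by omega
      have e2 : fj + 2 = (j : Int) := by omega
      rw [e1, e2]; tauto
    · have e1 : fi + 1 = (i : Int) := by omega
      have e2 : fj - 2 = (j : Int) := by omega
      rw [e1, e2]; tauto
    · have e1 : fi - 1 = (i : Int) := by omega
      have e2 : fj + 2 = (j : Int) := by omega
      rw [e1, e2]; tauto
    · have e1 : fi - 1 = (i : Int) := by omega
      have e2 : fj - 2 = (j : Int) := by omega
      rw [e1, e2]; tauto
    · have e1 : fi + 2 = (i : Int) := by omega
      have e2 : fj + 1 = (j : Int) := by omega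
      rw [e1, e2]; tauto
    · have e1 : fi + 2 = (i : Int) := by omega
      have e2 : fj - 1 = (j : Int) := by omega
      rw [e1, e2]; tauto
    · have e1 : fi - 2 = (i : Int) := by omega
      have e2 : fj + 1 = (j : Int) := by omega
      rw [e1, e2]; tauto
    · have e1 : fi - 2 = (i : Int) := by omega
      have e2 : fj - 1 = (j : Int) := by omega
      rw [e1, e2]; tauto

-- ===== VERDICT (by name: the statement is the Claim_ definition above) =====
theorem checkknwc_spec : Claim_equal_checkknwc := by
  intro deck fi fj face _ _
  exact ports_agree deck fi fj face
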